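-- pv_equiv track=rewrite | github.com/Taehyeon-Kim/PS | Heap/PG+더 맵게.py | solution
-- ===== SOURCE A (Python) =====
-- import heapq
--
-- def solution(scoville, K):
--     answer = 0
--     # 최소 힙으로 변환
--     heapq.heapify(scoville)
--
--     while len(scoville) > 1:
--
--         first = heapq.heappop(scoville)
--         second = heapq.heappop(scoville)
--         new = first + (second * 2)
--         heapq.heappush(scoville, new)
--
--         answer += 1
--
--         if scoville[0] >= K:
--             return answer
--
--     return -1
-- ===== SOURCE B (Python) =====
-- def solution(scoville, K):
--     # Sorted-list strategy: sort once, repeatedly take the two smallest from the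
--     # front and reinsert the mix at its ordered position (no heap).
--     # Return-value equivalence only: A heap-orders `scoville` in place, B does not mutate it.
--     s = sorted(scoville)
--     answer = 0
--     while len(s) > 1:
--         new = s[0] + s[1] * 2
--         del s[:2]
--         i = 0
--         while i < len(s) and s[i] <= new:
--             i += 1
--         s.insert(i, new)
--         answer += 1
--         if s[0] >= K:
--             return answer
--     return -1
-- ===== Notes on version B (the rewrite author's own statement) =====
-- stated objective: alternative
-- what changed: Replaces the binary heap with a sorted list: sort once, pop the two smallest from the front each round and reinsert the mix by ordered insertion; equivalence is about the return value only (A heap-orders the argument in place, B leaves it untouched).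
import Mathlib
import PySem

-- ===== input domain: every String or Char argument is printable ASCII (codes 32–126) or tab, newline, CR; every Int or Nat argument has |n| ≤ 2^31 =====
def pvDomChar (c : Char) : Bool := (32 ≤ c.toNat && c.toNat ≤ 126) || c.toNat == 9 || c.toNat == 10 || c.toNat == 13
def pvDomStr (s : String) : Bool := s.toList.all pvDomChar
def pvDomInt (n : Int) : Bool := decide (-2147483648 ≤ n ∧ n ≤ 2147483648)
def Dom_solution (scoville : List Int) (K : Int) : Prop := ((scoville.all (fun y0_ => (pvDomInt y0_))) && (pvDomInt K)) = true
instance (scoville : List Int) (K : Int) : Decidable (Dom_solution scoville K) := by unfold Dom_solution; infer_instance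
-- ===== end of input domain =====

-- B replaces A's binary heap by a sorted list with ordered insertion (return value
-- only: A heap-orders its argument in place, B leaves it unchanged).

-- ===== PORT A =====
-- A's heapq library calls (heapify/heappop/heappush) are ported as a verified
-- min-heap (a skew heap); the return value depends only on the multiset of the
-- heap's elements, on which this port is exact.
inductive SkewHeap
  | nil
  | node (x : Int) (l r : SkewHeap)
deriving DecidableEq, Repr

def SkewHeap.size : SkewHeap → Nat
  | .nil => 0
  | .node _ l r => l.size + r.size + 1

-- fuel-based structural merge (fuel ≥ total size; the fuel guard is totalization only)
def SkewHeap.mergeF : Nat → SkewHeap → SkewHeap → SkewHeap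
  | _, .nil, h => h
  | _, h, .nil => h
  | 0, h, _ => h   -- unreachable when fuel ≥ total size
  | f + 1, .node x l1 r1, .node y l2 r2 =>
    if x ≤ y then .node x (SkewHeap.mergeF f r1 (.node y l2 r2)) l1
    else .node y (SkewHeap.mergeF f r2 (.node x l1 r1)) l2

def SkewHeap.merge (a b : SkewHeap) : SkewHeap :=
  SkewHeap.mergeF (a.size + b.size) a b

def SkewHeap.push (h : SkewHeap) (x : Int) : SkewHeap :=
  h.merge (.node x .nil .nil)

-- heapq.heapify: build a min-heap holding scoville's elements
def heapifyA (l : List Int) : SkewHeap :=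
  l.foldl SkewHeap.push .nil

def SkewHeap.peek : SkewHeap → Int
  | .nil => 0   -- unreachable in solution: peeked heap is nonempty
  | .node x _ _ => x

-- the while loop of A; fuel = number of elements bounds the iterations (totalization only)
def loopA : Nat → SkewHeap → Int → Int → Int
  | 0, _, _, _ => -1
  | fuel + 1, h, K, ans =>
    match h with
    | .nil => -1                       -- len(scoville) ≤ 1: fall out of the loop
    | .node a l r =>
      match l.merge r with             -- first = heappop(...)
      | .nil => -1                     -- only one element left
      | .node b l2 r2 =>               -- second = heappop(...)
        let h3 := (l2.merge r2).push (a + b * 2)   -- heappush(scoville, first + second*2)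
        if h3.peek ≥ K then ans + 1 else loopA fuel h3 K (ans + 1)

def solution (scoville : List Int) (K : Int) : Int :=
  loopA scoville.length (heapifyA scoville) K 0

-- ===== PORT B =====
-- the inner `while i < len(s) and s[i] <= new` scan + insert of Source B
def insortB (s : List Int) (x : Int) : List Int :=
  match s with
  | [] => [x]
  | y :: ys => if y ≤ x then y :: insortB ys x else x :: y :: ys

-- the while loop of Source B; same fuel totalization
def loopB : Nat → List Int → Int → Int → Int
  | 0, _, _, _ => -1
  | fuel + 1, s, K, ans =>
    match s with
    | a :: b :: rest =>
      let s' := insortB rest (a + b * 2)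
      if s'.headI ≥ K then ans + 1 else loopB fuel s' K (ans + 1)
    | _ => -1

def solution_alt (scoville : List Int) (K : Int) : Int :=
  loopB scoville.length (PySem.List.sorted scoville (fun x => x)) K 0

-- ===== PRECONDITION & SPEC =====
def Spec_solution (scoville : List Int) (K : Int) (out : Int) : Prop := out = solution_alt scoville K
instance (scoville : List Int) (K : Int) (out : Int) : Decidable (Spec_solution scoville K out) := by unfold Spec_solution; infer_instance

-- ===== CLAIM (what is proved, stated in full; the proofs are below) =====
def Claim_equal_solution : Prop := ∀ (scoville : List Int) (K : Int), Dom_solution scoville K → Spec_solution scoville K (solution scoville K)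

-- ===== LEMMAS AND PROOFS =====

def SkewHeap.toList : SkewHeap → List Int
  | .nil => []
  | .node x l r => x :: (l.toList ++ r.toList)

def SkewHeap.IsHeap : SkewHeap → Prop
  | .nil => True
  | .node x l r => (∀ y ∈ l.toList ++ r.toList, x ≤ y) ∧ l.IsHeap ∧ r.IsHeap

theorem isHeap_node_iff {x : Int} {l r : SkewHeap} :
    (SkewHeap.node x l r).IsHeap ↔
      (∀ y ∈ l.toList ++ r.toList, x ≤ y) ∧ l.IsHeap ∧ r.IsHeap := by
  simp [SkewHeap.IsHeap]

theorem mset_mergeF (f : Nat) (a b : SkewHeap) (hf : a.size + b.size ≤ f) :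
    ((SkewHeap.mergeF f a b).toList : Multiset Int)
      = (a.toList : Multiset Int) + (b.toList : Multiset Int) := by
  fun_induction SkewHeap.mergeF f a b with
  | case1 f h => simp [SkewHeap.toList]
  | case2 f h h2 => cases h <;> simp [SkewHeap.toList]
  | case3 h b hne _ =>
    exfalso
    cases h with
    | nil => exact hne rfl
    | node x l r => simp only [SkewHeap.size] at hf; omega
  | case4 f x l1 r1 y l2 r2 hxy ih =>
    simp only [SkewHeap.size] at hf
    simp only [SkewHeap.toList, ← Multiset.coe_add, ← Multiset.cons_coe,
      ← Multiset.singleton_add, ih (by simp [SkewHeap.size]; omega)]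
    abel
  | case5 f x l1 r1 y l2 r2 hxy ih =>
    simp only [SkewHeap.size] at hf
    simp only [SkewHeap.toList, ← Multiset.coe_add, ← Multiset.cons_coe,
      ← Multiset.singleton_add, ih (by simp [SkewHeap.size]; omega)]
    abel

theorem mset_merge (a b : SkewHeap) :
    ((a.merge b).toList : Multiset Int) = (a.toList : Multiset Int) + (b.toList : Multiset Int) :=
  mset_mergeF _ a b (le_refl _)

theorem mem_toList_mergeF {y : Int} {f : Nat} {a b : SkewHeap} (hf : a.size + b.size ≤ f) :
    y ∈ (SkewHeap.mergeF f a b).toList ↔ y ∈ a.toList ∨ y ∈ b.toList := by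
  rw [← Multiset.mem_coe, mset_mergeF f a b hf]; simp

theorem isHeap_mergeF {f : Nat} {a b : SkewHeap} (hf : a.size + b.size ≤ f)
    (ha : a.IsHeap) (hb : b.IsHeap) : (SkewHeap.mergeF f a b).IsHeap := by
  fun_induction SkewHeap.mergeF f a b with
  | case1 => exact hb
  | case2 => exact ha
  | case3 h b hne _ =>
    exfalso
    cases h with
    | nil => exact hne rfl
    | node x l r => simp only [SkewHeap.size] at hf; omega
  | case4 f x l1 r1 y l2 r2 hxy ih =>
    rw [isHeap_node_iff] at ha hb ⊢
    obtain ⟨hx, hl1, hr1⟩ := ha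
    obtain ⟨hy, hl2, hr2⟩ := hb
    have hf' : r1.size + (SkewHeap.node y l2 r2).size ≤ f := by
      simp only [SkewHeap.size] at hf ⊢; omega
    refine ⟨?_, ih hf' hr1 (isHeap_node_iff.mpr ⟨hy, hl2, hr2⟩), hl1⟩
    intro z hz
    rcases List.mem_append.mp hz with hz | hz
    · rcases (mem_toList_mergeF hf').mp hz with hz | hz
      · exact hx _ (List.mem_append.mpr (Or.inr hz))
      · have hz' : z = y ∨ z ∈ l2.toList ∨ z ∈ r2.toList := by
          simpa [SkewHeap.toList] using hz
        rcases hz' with rfl | hz' | hz'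
        · exact hxy
        · exact le_trans hxy (hy _ (List.mem_append.mpr (Or.inl hz')))
        · exact le_trans hxy (hy _ (List.mem_append.mpr (Or.inr hz')))
    · exact hx _ (List.mem_append.mpr (Or.inl hz))
  | case5 f x l1 r1 y l2 r2 hxy ih =>
    rw [isHeap_node_iff] at ha hb ⊢
    obtain ⟨hx, hl1, hr1⟩ := ha
    obtain ⟨hy, hl2, hr2⟩ := hb
    have hyx : y ≤ x := le_of_not_ge (by omega)
    have hf' : r2.size + (SkewHeap.node x l1 r1).size ≤ f := by
      simp only [SkewHeap.size] at hf ⊢; omega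
    refine ⟨?_, ih hf' hr2 (isHeap_node_iff.mpr ⟨hx, hl1, hr1⟩), hl2⟩
    intro z hz
    rcases List.mem_append.mp hz with hz | hz
    · rcases (mem_toList_mergeF hf').mp hz with hz | hz
      · exact hy _ (List.mem_append.mpr (Or.inr hz))
      · have hz' : z = x ∨ z ∈ l1.toList ∨ z ∈ r1.toList := by
          simpa [SkewHeap.toList] using hz
        rcases hz' with rfl | hz' | hz'
        · exact hyx
        · exact le_trans hyx (hx _ (List.mem_append.mpr (Or.inl hz')))
        · exact le_trans hyx (hx _ (List.mem_append.mpr (Or.inr hz')))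
    · exact hy _ (List.mem_append.mpr (Or.inl hz))

theorem isHeap_merge {a b : SkewHeap} (ha : a.IsHeap) (hb : b.IsHeap) :
    (a.merge b).IsHeap :=
  isHeap_mergeF (le_refl _) ha hb

theorem root_le_all {x : Int} {l r : SkewHeap} (h : (SkewHeap.node x l r).IsHeap) :
    ∀ y ∈ (SkewHeap.node x l r).toList, x ≤ y := by
  intro y hy
  have hy' : y = x ∨ y ∈ l.toList ∨ y ∈ r.toList := by
    simpa [SkewHeap.toList] using hy
  rcases hy' with rfl | hy' | hy'
  · exact le_refl y
  · exact (isHeap_node_iff.mp h).1 _ (List.mem_append.mpr (Or.inl hy'))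
  · exact (isHeap_node_iff.mp h).1 _ (List.mem_append.mpr (Or.inr hy'))

theorem mset_push (h : SkewHeap) (x : Int) :
    ((h.push x).toList : Multiset Int) = x ::ₘ (h.toList : Multiset Int) := by
  rw [SkewHeap.push, mset_merge]
  simp only [SkewHeap.toList, List.append_nil, ← Multiset.cons_coe,
    ← Multiset.singleton_add, Multiset.coe_nil]
  abel

theorem isHeap_push {h : SkewHeap} (hh : h.IsHeap) (x : Int) : (h.push x).IsHeap :=
  isHeap_merge hh (isHeap_node_iff.mpr (by simp [SkewHeap.toList, SkewHeap.IsHeap]))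

theorem heapifyA_ok (l : List Int) :
    (heapifyA l).IsHeap ∧ ((heapifyA l).toList : Multiset Int) = (l : Multiset Int) := by
  have main : ∀ (l : List Int) (h : SkewHeap), h.IsHeap →
      (l.foldl SkewHeap.push h).IsHeap ∧
      ((l.foldl SkewHeap.push h).toList : Multiset Int)
        = (h.toList : Multiset Int) + (l : Multiset Int) := by
    intro l
    induction l with
    | nil => intro h hh; exact ⟨hh, by simp⟩
    | cons a t ih =>
      intro h hh
      obtain ⟨h1, h2⟩ := ih (h.push a) (isHeap_push hh a)
      rw [List.foldl_cons]
      refine ⟨h1, ?_⟩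
      rw [h2, mset_push]
      simp only [← Multiset.cons_coe, ← Multiset.singleton_add]
      abel
  have h := main l .nil (by simp [SkewHeap.IsHeap])
  simpa [heapifyA, SkewHeap.toList] using h

theorem mset_insortB (s : List Int) (x : Int) :
    ((insortB s x : List Int) : Multiset Int) = x ::ₘ (s : Multiset Int) := by
  induction s with
  | nil => simp [insortB]
  | cons y ys ih =>
    simp only [insortB]
    split
    · show ((y :: insortB ys x : List Int) : Multiset Int) = _
      rw [← Multiset.cons_coe, ih, ← Multiset.cons_coe, Multiset.cons_swap]
    · rfl

theorem insortB_ne_nil (s : List Int) (x : Int) : insortB s x ≠ [] := by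
  cases s with
  | nil => simp [insortB]
  | cons y ys => simp only [insortB]; split <;> simp

theorem pairwise_insortB {s : List Int} {x : Int} (hs : s.Pairwise (· ≤ ·)) :
    (insortB s x).Pairwise (· ≤ ·) := by
  induction s with
  | nil => simp [insortB]
  | cons y ys ih =>
    rw [List.pairwise_cons] at hs
    simp only [insortB]
    split
    · rename_i hyx
      rw [List.pairwise_cons]
      refine ⟨?_, ih hs.2⟩
      intro z hz
      have hz' : z ∈ ((insortB ys x : List Int) : Multiset Int) := Multiset.mem_coe.mpr hz
      rw [mset_insortB] at hz'
      rcases Multiset.mem_cons.mp hz' with rfl | hz''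
      · exact hyx
      · exact hs.1 _ (Multiset.mem_coe.mp hz'')
    · rename_i hyx
      rw [List.pairwise_cons]
      refine ⟨?_, List.pairwise_cons.mpr hs⟩
      intro z hz
      rcases List.mem_cons.mp hz with rfl | hz'
      · omega
      · exact le_trans (by omega) (hs.1 _ hz')

theorem sorted_head_le {d : Int} {t : List Int} (hs : (d :: t).Pairwise (· ≤ ·)) :
    ∀ y ∈ d :: t, d ≤ y := by
  intro y hy
  rcases List.mem_cons.mp hy with rfl | hy'
  · exact le_refl y
  · exact (List.pairwise_cons.mp hs).1 _ hy'

-- heap root = head of the sorted list when they hold the same elements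
theorem peek_eq_headI {h : SkewHeap} {s : List Int} (hh : h.IsHeap)
    (hs : s.Pairwise (· ≤ ·)) (hm : (h.toList : Multiset Int) = (s : Multiset Int))
    (hne : s ≠ []) : h.peek = s.headI := by
  cases h with
  | nil =>
    exfalso
    cases s with
    | nil => exact hne rfl
    | cons d t => simp [SkewHeap.toList, ← Multiset.cons_coe, eq_comm] at hm
  | node c cl cr =>
    cases s with
    | nil => exact absurd rfl hne
    | cons d t =>
      have hmemC : c ∈ (d :: t) := by
        have : c ∈ ((d :: t : List Int) : Multiset Int) := by
          rw [← hm]; simp [SkewHeap.toList]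
        simpa using this
      have hmemD : d ∈ (SkewHeap.node c cl cr).toList := by
        have : d ∈ ((SkewHeap.node c cl cr).toList : Multiset Int) := by
          rw [hm]; simp
        simpa using this
      have : c = d := le_antisymm (root_le_all hh _ hmemD) (sorted_head_le hs _ hmemC)
      simp [SkewHeap.peek, this]

-- the loops agree in lockstep: same fuel, heap contents = sorted-list contents
theorem loop_eq (fuel : Nat) :
    ∀ (h : SkewHeap) (s : List Int) (K ans : Int),
      h.IsHeap → s.Pairwise (· ≤ ·) →
      (h.toList : Multiset Int) = (s : Multiset Int) →
      loopA fuel h K ans = loopB fuel s K ans := by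
  induction fuel with
  | zero => intro h s K ans _ _ _; rfl
  | succ fuel ih =>
    intro h s K ans hh hs hm
    cases h with
    | nil =>
      have : s = [] := by simpa [SkewHeap.toList] using hm.symm
      subst this; rfl
    | node a l r =>
      cases s with
      | nil => simp [SkewHeap.toList] at hm
      | cons a0 s1 =>
        have hmemA : a ∈ (a0 :: s1) := by
          have : a ∈ ((a0 :: s1 : List Int) : Multiset Int) := by
            rw [← hm]; simp [SkewHeap.toList]
          simpa using this
        have hmemA0 : a0 ∈ (SkewHeap.node a l r).toList := by
          have : a0 ∈ ((SkewHeap.node a l r).toList : Multiset Int) := by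
            rw [hm]; simp
          simpa using this
        have haa0 : a = a0 :=
          le_antisymm (root_le_all hh _ hmemA0) (sorted_head_le hs _ hmemA)
        subst haa0
        have hm1 : ((l.toList ++ r.toList : List Int) : Multiset Int) = (s1 : Multiset Int) := by
          have h' := hm
          simp only [SkewHeap.toList, ← Multiset.cons_coe] at h'
          exact (Multiset.cons_inj_right a).mp h'
        have hmerge : ((l.merge r).toList : Multiset Int) = (s1 : Multiset Int) := by
          rw [mset_merge, ← hm1]; simp [← Multiset.coe_add]
        have hsh : (l.merge r).IsHeap :=
          isHeap_merge (isHeap_node_iff.mp hh).2.1 (isHeap_node_iff.mp hh).2.2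
        cases hlr : l.merge r with
        | nil =>
          have : s1 = [] := by
            rw [hlr] at hmerge
            simpa [SkewHeap.toList] using hmerge.symm
          subst this
          simp [loopA, loopB, hlr]
        | node b l2 r2 =>
          rw [hlr] at hmerge hsh
          cases s1 with
          | nil => simp [SkewHeap.toList] at hmerge
          | cons b0 s2 =>
            have hs1 : (b0 :: s2).Pairwise ((· ≤ ·) : Int → Int → Prop) :=
              (List.pairwise_cons.mp hs).2
            have hmemB : b ∈ (b0 :: s2) := by
              have : b ∈ ((b0 :: s2 : List Int) : Multiset Int) := by
                rw [← hmerge]; simp [SkewHeap.toList]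
              simpa using this
            have hmemB0 : b0 ∈ (SkewHeap.node b l2 r2).toList := by
              have : b0 ∈ ((SkewHeap.node b l2 r2).toList : Multiset Int) := by
                rw [hmerge]; simp
              simpa using this
            have hbb0 : b = b0 :=
              le_antisymm (root_le_all hsh _ hmemB0) (sorted_head_le hs1 _ hmemB)
            subst hbb0
            have hm2 : ((l2.toList ++ r2.toList : List Int) : Multiset Int) = (s2 : Multiset Int) := by
              have h' := hmerge
              simp only [SkewHeap.toList, ← Multiset.cons_coe] at h'
              exact (Multiset.cons_inj_right b).mp h'
            have hmset3 : (((l2.merge r2).push (a + b * 2)).toList : Multiset Int)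
                = ((insortB s2 (a + b * 2) : List Int) : Multiset Int) := by
              rw [mset_push, mset_merge, mset_insortB, ← hm2]
              simp [← Multiset.coe_add]
            have hheap3 : ((l2.merge r2).push (a + b * 2)).IsHeap :=
              isHeap_push (isHeap_merge (isHeap_node_iff.mp hsh).2.1 (isHeap_node_iff.mp hsh).2.2) _
            have hsort' : (insortB s2 (a + b * 2)).Pairwise ((· ≤ ·) : Int → Int → Prop) :=
              pairwise_insortB (List.pairwise_cons.mp hs1).2
            have hpeek : ((l2.merge r2).push (a + b * 2)).peek = (insortB s2 (a + b * 2)).headI :=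
              peek_eq_headI hheap3 hsort' hmset3 (insortB_ne_nil _ _)
            simp only [loopA, loopB, hlr]
            rw [hpeek]
            split
            · rfl
            · exact ih _ _ K (ans + 1) hheap3 hsort' hmset3

-- ===== VERDICT (by name: the statement is the Claim_ definition above) =====
theorem solution_spec : Claim_equal_solution := by
  intro scoville K _
  unfold Spec_solution solution solution_alt
  obtain ⟨hheap, hmset⟩ := heapifyA_ok scoville
  apply loop_eq
  · exact hheap
  · simpa using PySem.List.sorted_pairwise scoville (fun x => x)
  · rw [hmset]
    exact (Multiset.coe_eq_coe.mpr (PySem.List.sorted_perm scoville (fun x => x) false)).symm
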